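-- pv_equiv track=rewrite | github.com/vaidehidubey122005/Misson_DSA | hackerrank/goodland-electricity.py | goodlandElectricity
-- ===== SOURCE A (Python) =====
-- from collections import deque
--
-- def goodlandElectricity(grid):
--     n, m = len(grid), len(grid[0])
--     directions = [(-1, 0), (1, 0), (0, -1), (0, 1)]
--
--     # Initialize queue for BFS
--     queue = deque()
--     visited = [[False] * m for _ in range(n)]
--
--     # Add all power stations to the queue
--     for i in range(n):
--         for j in range(m):
--             if grid[i][j] == 1:
--                 queue.append((i, j, 0))  # (x, y, distance)
--                 visited[i][j] = True
--
--     total_cost = 0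
--
--     # BFS to calculate the minimum cost for each cell
--     while queue:
--         x, y, dist = queue.popleft()
--
--         for dx, dy in directions:
--             nx, ny = x + dx, y + dy
--
--             if 0 <= nx < n and 0 <= ny < m and not visited[nx][ny]:
--                 visited[nx][ny] = True
--                 queue.append((nx, ny, dist + 1))
--                 total_cost += dist + 1  # Add the distance to total cost
--
--     return total_cost
-- ===== SOURCE B (Python) =====
-- def goodlandElectricity(grid):
--     n, m = len(grid), len(grid[0])
--     stations = [(i, j) for i in range(n) for j in range(m) if grid[i][j] == 1]
--     if not stations:
--         return 0
--     return sum(min(abs(i - si) + abs(j - sj) for si, sj in stations)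
--                for i in range(n) for j in range(m))
-- ===== Notes on version B (the rewrite author's own statement) =====
-- stated objective: simpler
-- what changed: Replaces A's multi-source BFS (deque + visited matrix, per-enqueue cost accumulation) by a direct closed-form sum: collect the station cells once and sum, over all cells, the minimum Manhattan distance to a station (equal to BFS distance since the grid has no obstacles), returning 0 when there is no station.
import Mathlib
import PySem

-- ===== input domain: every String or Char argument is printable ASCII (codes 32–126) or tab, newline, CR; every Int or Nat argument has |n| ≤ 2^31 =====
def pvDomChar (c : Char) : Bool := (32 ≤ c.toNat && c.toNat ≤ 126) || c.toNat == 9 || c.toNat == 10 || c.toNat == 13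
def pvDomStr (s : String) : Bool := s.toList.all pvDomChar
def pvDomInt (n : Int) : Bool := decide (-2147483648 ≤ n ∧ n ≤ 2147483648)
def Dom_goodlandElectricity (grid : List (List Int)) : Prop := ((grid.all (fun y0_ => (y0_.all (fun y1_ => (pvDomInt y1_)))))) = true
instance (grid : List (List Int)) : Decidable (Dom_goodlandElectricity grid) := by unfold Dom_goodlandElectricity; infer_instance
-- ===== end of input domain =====

-- B replaces A's multi-source BFS (queue + visited matrix) by a direct closed-form sum of
-- minimum Manhattan distances from each cell to the nearest station (valid because the grid
-- has no obstacles); objective: simpler.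

-- ===== PORT A =====
-- visited[x][y] lookup / in-place set (indices are guarded nonnegative before use)
def pvVget (vis : List (List Bool)) (x y : Int) : Bool :=
  (vis.getD x.toNat []).getD y.toNat false

def pvVset (vis : List (List Bool)) (x y : Int) : List (List Bool) :=
  vis.set x.toNat ((vis.getD x.toNat []).set y.toNat true)

-- directions = [(-1,0),(1,0),(0,-1),(0,1)]
def pvDirs : List (Int × Int) := [(-1,0),(1,0),(0,-1),(0,1)]

-- body of the inner `for dx, dy in directions` loop of A
def pvRelax (n m : ℕ) (x y d : Int)
    (st : List (Int × Int × Int) × List (List Bool) × Int) (dir : Int × Int) :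
    List (Int × Int × Int) × List (List Bool) × Int :=
  let nx := x + dir.1
  let ny := y + dir.2
  if 0 ≤ nx ∧ nx < (n : Int) ∧ 0 ≤ ny ∧ ny < (m : Int) ∧ pvVget st.2.1 nx ny = false then
    (st.1 ++ [(nx, ny, d + 1)], pvVset st.2.1 nx ny, st.2.2 + (d + 1))
  else st

-- the `while queue` loop of A; fuel only makes the recursion structural (it never runs out:
-- each iteration pops one entry and every cell is enqueued at most once)
def pvBfs (n m : ℕ) : ℕ → List (Int × Int × Int) → List (List Bool) → Int → Int
  | 0, _, _, t => t
  | _ + 1, [], _, t => t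
  | fuel + 1, (x, y, d) :: rest, vis, t =>
      let s := pvDirs.foldl (pvRelax n m x y d) (rest, vis, t)
      pvBfs n m fuel s.1 s.2.1 s.2.2

def goodlandElectricity (grid : List (List Int)) : Int :=
  let n := grid.length
  let m := (grid.headI).length
  let init := (List.range n).foldl (fun st (i : ℕ) => (List.range m).foldl (fun st (j : ℕ) =>
      if (grid.getD i []).getD j 0 = 1 then
        (st.1 ++ [((i : Int), (j : Int), (0 : Int))], pvVset st.2 (i : Int) (j : Int))
      else st) st)
      (([] : List (Int × Int × Int)), List.replicate n (List.replicate m false))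
  pvBfs n m (3 * n * m + 1) init.1 init.2 0

-- ===== PORT B =====
def goodlandElectricity_alt (grid : List (List Int)) : Int :=
  let n := grid.length
  let m := (grid.headI).length
  let stations := (List.range n).flatMap (fun (i : ℕ) =>
      ((List.range m).filter (fun j => (grid.getD i []).getD j 0 = 1)).map
        (fun (j : ℕ) => ((i : Int), (j : Int))))
  if stations = [] then 0
  else (List.range n).foldl (fun (acc : Int) (i : ℕ) => (List.range m).foldl (fun (acc : Int) (j : ℕ) =>
        acc + ((stations.map (fun s => |(i : Int) - s.1| + |(j : Int) - s.2|)).min?).getD 0) acc) 0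

-- ===== PRECONDITION & SPEC =====
-- Pre_ excludes exactly the inputs on which A raises IndexError: the empty grid (grid[0])
-- and grids with a row shorter than the first row (grid[i][j] for j < len(grid[0])).
def Pre_goodlandElectricity (grid : List (List Int)) : Prop :=
  grid ≠ [] ∧ ∀ row ∈ grid, (grid.headI).length ≤ row.length
instance (grid : List (List Int)) : Decidable (Pre_goodlandElectricity grid) := by
  unfold Pre_goodlandElectricity; infer_instance

def pvWitness_goodlandElectricity : List (List Int) := [[1, 0, 0], [0, 0, 1]]

def Spec_goodlandElectricity (grid : List (List Int)) (out : Int) : Prop := out = goodlandElectricity_alt grid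
instance (grid : List (List Int)) (out : Int) : Decidable (Spec_goodlandElectricity grid out) := by unfold Spec_goodlandElectricity; infer_instance

-- ===== CLAIM (what is proved, stated in full; the proofs are below) =====
def Claim_equal_goodlandElectricity : Prop := ∀ (grid : List (List Int)), Dom_goodlandElectricity grid → Pre_goodlandElectricity grid → Spec_goodlandElectricity grid (goodlandElectricity grid)

-- ===== LEMMAS AND PROOFS =====

-- abstract vocabulary used only by the proofs
def okc (n m : ℕ) (x y : Int) : Prop := 0 ≤ x ∧ x < (n : Int) ∧ 0 ≤ y ∧ y < (m : Int)

def nbr (x y a b : Int) : Prop := ((a = x + 1 ∨ a = x - 1) ∧ b = y) ∨ (a = x ∧ (b = y + 1 ∨ b = y - 1))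

def dmin (St : List (Int × Int)) (x y : Int) : Int :=
  ((St.map (fun s => |x - s.1| + |y - s.2|)).min?).getD 0

def Shp (n m : ℕ) (vis : List (List Bool)) : Prop :=
  vis.length = n ∧ ∀ r ∈ vis, r.length = m

def SumV (n m : ℕ) (St : List (Int × Int)) (vis : List (List Bool)) : Int :=
  ∑ i ∈ Finset.range n, ∑ j ∈ Finset.range m,
    (if pvVget vis (i : Int) (j : Int) then dmin St (i : Int) (j : Int) else 0)

def UnvN (n m : ℕ) (vis : List (List Bool)) : ℕ :=
  ∑ i ∈ Finset.range n, ∑ j ∈ Finset.range m,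
    (if pvVget vis (i : Int) (j : Int) then 0 else 1)

def TotD (n m : ℕ) (St : List (Int × Int)) : Int :=
  ∑ i ∈ Finset.range n, ∑ j ∈ Finset.range m, dmin St (i : Int) (j : Int)

def QInv (n m : ℕ) (St : List (Int × Int)) (q : List (Int × Int × Int)) (vis : List (List Bool)) : Prop :=
  ∀ e ∈ q, okc n m e.1 e.2.1 ∧ pvVget vis e.1 e.2.1 = true ∧ e.2.2 = dmin St e.1 e.2.1

def Cov (n m : ℕ) (St : List (Int × Int)) (d0 : Int) (vis : List (List Bool)) : Prop :=
  ∀ x y, okc n m x y → dmin St x y ≤ d0 → pvVget vis x y = true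

def Band (n m : ℕ) (St : List (Int × Int)) (q : List (Int × Int × Int)) (vis : List (List Bool)) : Prop :=
  q = [] ∨ ∃ d0 q1 q2, q = q1 ++ q2 ∧ q1 ≠ [] ∧ (∀ e ∈ q1, e.2.2 = d0) ∧
    (∀ e ∈ q2, e.2.2 = d0 + 1) ∧ Cov n m St d0 vis

def PInv (n m : ℕ) (q : List (Int × Int × Int)) (vis : List (List Bool)) : Prop :=
  ∀ x y, okc n m x y → pvVget vis x y = true → (∀ e ∈ q, ¬(e.1 = x ∧ e.2.1 = y)) →
    ∀ a b, okc n m a b → nbr x y a b → pvVget vis a b = true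

def EInv (n m : ℕ) (q : List (Int × Int × Int)) (vis : List (List Bool)) : Prop :=
  q = [] → ∀ x y, okc n m x y → pvVget vis x y = true

def BInv (n m : ℕ) (St : List (Int × Int)) (q : List (Int × Int × Int)) (vis : List (List Bool)) : Prop :=
  Shp n m vis ∧ QInv n m St q vis ∧ Band n m St q vis ∧ PInv n m q vis ∧ EInv n m q vis

-- ---- matrix lemmas ----
theorem vget_replicate (n m : ℕ) (x y : Int) :
    pvVget (List.replicate n (List.replicate m false)) x y = false := by
  unfold pvVget
  rcases lt_or_ge x.toNat n with h | h
  · have hr : (List.replicate n (List.replicate m false)).getD x.toNat [] = List.replicate m false := by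
      rw [List.getD_eq_getElem?_getD, List.getElem?_replicate_of_lt h]; rfl
    rw [hr]
    rcases lt_or_ge y.toNat m with h2 | h2
    · rw [List.getD_eq_getElem?_getD, List.getElem?_replicate_of_lt h2]; rfl
    · rw [List.getD_eq_getElem?_getD, List.getElem?_eq_none_iff.2 (by simpa using h2)]; rfl
  · have hr : (List.replicate n (List.replicate m false)).getD x.toNat [] = [] := by
      rw [List.getD_eq_getElem?_getD, List.getElem?_eq_none_iff.2 (by simpa using h)]; rfl
    rw [hr]; rfl

theorem shp_replicate (n m : ℕ) : Shp n m (List.replicate n (List.replicate m false)) := by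
  refine ⟨by simp, ?_⟩
  intro r hr; simp [List.eq_of_mem_replicate hr]

theorem shp_vset (n m : ℕ) (vis : List (List Bool)) (x y : Int) (h : Shp n m vis)
    (hx : okc n m x y) : Shp n m (pvVset vis x y) := by
  obtain ⟨h1, h2⟩ := h
  refine ⟨by simpa [pvVset] using h1, ?_⟩
  intro r hr
  rcases List.mem_or_eq_of_mem_set hr with hm | rfl
  · exact h2 _ hm
  · have hxl : x.toNat < vis.length := by obtain ⟨_,_,_,_⟩ := hx; omega
    rw [List.length_set, List.getD_eq_getElem?_getD, List.getElem?_eq_getElem hxl]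
    exact h2 _ (List.getElem_mem hxl)

theorem vget_vset_self (n m : ℕ) (vis : List (List Bool)) (x y : Int)
    (h : Shp n m vis) (hx : okc n m x y) : pvVget (pvVset vis x y) x y = true := by
  obtain ⟨h1, h2⟩ := h
  obtain ⟨hx0, hxn, hy0, hym⟩ := hx
  have hxl : x.toNat < vis.length := by omega
  have hrow : (vis.getD x.toNat []).length = m := by
    rw [List.getD_eq_getElem?_getD, List.getElem?_eq_getElem hxl]
    exact h2 _ (List.getElem_mem hxl)
  have hyl : y.toNat < (vis.getD x.toNat []).length := by omega
  simp only [pvVget, pvVset, List.getD_eq_getElem?_getD]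
  rw [List.getElem?_set_self (by simpa using hxl)]
  simp [List.getElem?_set_self hyl, ← List.getD_eq_getElem?_getD]

theorem vget_vset_ne (vis : List (List Bool)) (x y a b : Int)
    (hx : 0 ≤ x) (hy : 0 ≤ y) (ha : 0 ≤ a) (hb : 0 ≤ b) (hne : ¬(a = x ∧ b = y)) :
    pvVget (pvVset vis x y) a b = pvVget vis a b := by
  simp only [pvVget, pvVset, List.getD_eq_getElem?_getD]
  by_cases hax : a.toNat = x.toNat
  · have hax' : a = x := by omega
    have hby : b.toNat ≠ y.toNat := by omega
    subst hax'
    rcases lt_or_ge a.toNat vis.length with hl | hl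
    · rw [List.getElem?_set_self hl]
      simp [List.getElem?_set_ne (Ne.symm hby), ← List.getD_eq_getElem?_getD]
    · rw [List.set_eq_of_length_le (by simpa using hl)]
  · rw [List.getElem?_set_ne (Ne.symm hax)]

-- ---- dmin lemmas ----
theorem dmin_some (St : List (Int × Int)) (x y : Int) (h : St ≠ []) :
    (St.map (fun s => |x - s.1| + |y - s.2|)).min? = some (dmin St x y) := by
  cases hl : (St.map (fun s => |x - s.1| + |y - s.2|)).min? with
  | none => exact absurd (List.map_eq_nil_iff.1 (List.min?_eq_none_iff.1 hl)) h
  | some a => simp [dmin, hl]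

theorem dmin_le (St : List (Int × Int)) (x y : Int) (s : Int × Int) (hs : s ∈ St) :
    dmin St x y ≤ |x - s.1| + |y - s.2| := by
  have h : St ≠ [] := by rintro rfl; simp at hs
  have := (List.min?_eq_some_iff.1 (dmin_some St x y h)).2
  exact this _ (List.mem_map_of_mem hs)

theorem dmin_mem (St : List (Int × Int)) (x y : Int) (h : St ≠ []) :
    ∃ s ∈ St, dmin St x y = |x - s.1| + |y - s.2| := by
  have := (List.min?_eq_some_iff.1 (dmin_some St x y h)).1
  obtain ⟨s, hs, he⟩ := List.mem_map.1 this
  exact ⟨s, hs, he.symm⟩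

theorem dmin_nonneg (St : List (Int × Int)) (x y : Int) : 0 ≤ dmin St x y := by
  rcases eq_or_ne St [] with rfl | h
  · simp [dmin]
  · obtain ⟨s, _, he⟩ := dmin_mem St x y h
    rw [he]; positivity

theorem dmin_station (St : List (Int × Int)) (x y : Int) (h : (x, y) ∈ St) :
    dmin St x y = 0 := by
  have h1 := dmin_le St x y (x, y) h
  have h2 := dmin_nonneg St x y
  simp at h1; omega

theorem dmin_zero_mem (St : List (Int × Int)) (x y : Int) (h : St ≠ [])
    (h0 : dmin St x y = 0) : (x, y) ∈ St := by
  obtain ⟨s, hs, he⟩ := dmin_mem St x y h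
  have hx : x = s.1 ∧ y = s.2 := by
    rw [h0] at he
    constructor <;> [skip; skip] <;>
    · have := abs_nonneg (x - s.1); have := abs_nonneg (y - s.2)
      have hx1 : |x - s.1| = 0 ∧ |y - s.2| = 0 := by omega
      have := abs_eq_zero.1 hx1.1; have := abs_eq_zero.1 hx1.2
      omega
  obtain ⟨hx1, hx2⟩ := hx
  rw [hx1, hx2]; exact hs

theorem dmin_lip (St : List (Int × Int)) (x y a b : Int) (h : St ≠ [])
    (hn : nbr x y a b) : dmin St a b ≤ dmin St x y + 1 := by
  obtain ⟨s, hs, he⟩ := dmin_mem St x y h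
  have h1 := dmin_le St a b s hs
  have h2 : |a - s.1| + |b - s.2| ≤ |x - s.1| + |y - s.2| + 1 := by
    unfold nbr at hn
    rcases abs_cases (x - s.1) with ⟨e1, _⟩ | ⟨e1, _⟩ <;>
    rcases abs_cases (y - s.2) with ⟨e2, _⟩ | ⟨e2, _⟩ <;>
    rcases abs_cases (a - s.1) with ⟨e3, _⟩ | ⟨e3, _⟩ <;>
    rcases abs_cases (b - s.2) with ⟨e4, _⟩ | ⟨e4, _⟩ <;> omega
  omega

theorem dmin_desc (n m : ℕ) (St : List (Int × Int)) (x y : Int) (h : St ≠ [])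
    (hok : ∀ s ∈ St, okc n m s.1 s.2) (hxy : okc n m x y) (h1 : 1 ≤ dmin St x y) :
    ∃ a b, okc n m a b ∧ nbr x y a b ∧ dmin St a b = dmin St x y - 1 := by
  obtain ⟨s, hs, he⟩ := dmin_mem St x y h
  obtain ⟨hs1, hs2, hs3, hs4⟩ := hok s hs
  obtain ⟨hx0, hxn, hy0, hym⟩ := hxy
  -- choose the step toward s
  have hstep : ∃ a b, okc n m a b ∧ nbr x y a b ∧ |a - s.1| + |b - s.2| = |x - s.1| + |y - s.2| - 1 := by
    rcases lt_trichotomy x s.1 with hc | hc | hc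
    · refine ⟨x + 1, y, ⟨by omega, by omega, hy0, hym⟩, Or.inl ⟨Or.inl rfl, rfl⟩, ?_⟩
      rcases abs_cases (y - s.2) with ⟨e2, _⟩ | ⟨e2, _⟩ <;>
      rcases abs_cases (x - s.1) with ⟨e1, _⟩ | ⟨e1, _⟩ <;>
      rcases abs_cases (x + 1 - s.1) with ⟨e3, _⟩ | ⟨e3, _⟩ <;> omega
    · -- x = s.1, so y ≠ s.2
      have hy : y ≠ s.2 := by
        intro hy'
        have hz : dmin St x y = 0 := by rw [he, hc, hy']; simp
        omega
      rcases lt_or_gt_of_ne hy with hcy | hcy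
      · refine ⟨x, y + 1, ⟨hx0, hxn, by omega, by omega⟩, Or.inr ⟨rfl, Or.inl rfl⟩, ?_⟩
        rcases abs_cases (y - s.2) with ⟨e2, _⟩ | ⟨e2, _⟩ <;>
        rcases abs_cases (y + 1 - s.2) with ⟨e3, _⟩ | ⟨e3, _⟩ <;> omega
      · refine ⟨x, y - 1, ⟨hx0, hxn, by omega, by omega⟩, Or.inr ⟨rfl, Or.inr rfl⟩, ?_⟩
        rcases abs_cases (y - s.2) with ⟨e2, _⟩ | ⟨e2, _⟩ <;>
        rcases abs_cases (y - 1 - s.2) with ⟨e3, _⟩ | ⟨e3, _⟩ <;> omega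
    · refine ⟨x - 1, y, ⟨by omega, by omega, hy0, hym⟩, Or.inl ⟨Or.inr rfl, rfl⟩, ?_⟩
      rcases abs_cases (y - s.2) with ⟨e2, _⟩ | ⟨e2, _⟩ <;>
      rcases abs_cases (x - s.1) with ⟨e1, _⟩ | ⟨e1, _⟩ <;>
      rcases abs_cases (x - 1 - s.1) with ⟨e3, _⟩ | ⟨e3, _⟩ <;> omega
  obtain ⟨a, b, hab, hnab, hdab⟩ := hstep
  refine ⟨a, b, hab, hnab, ?_⟩
  have hle : dmin St a b ≤ dmin St x y - 1 := by
    have := dmin_le St a b s hs; omega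
  -- reverse Lipschitz: nbr is symmetric
  have hsym : nbr a b x y := by
    unfold nbr at hnab ⊢
    rcases hnab with ⟨h5 | h5, h6⟩ | ⟨h5, h6 | h6⟩ <;> subst h5 <;> subst h6 <;> simp
  have := dmin_lip St a b x y h hsym
  omega

-- ---- sum lemmas ----
theorem sumv_flip (n m : ℕ) (St : List (Int × Int)) (vis : List (List Bool)) (x y : Int)
    (h : Shp n m vis) (hx : okc n m x y) (hv : pvVget vis x y = false) :
    SumV n m St (pvVset vis x y) = SumV n m St vis + dmin St x y := by
  obtain ⟨hx0, hxn, hy0, hym⟩ := hx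
  unfold SumV
  have key : ∀ i ∈ Finset.range n, ∀ j ∈ Finset.range m,
      (if pvVget (pvVset vis x y) (i : Int) (j : Int) then dmin St (i : Int) (j : Int) else 0) =
      (if pvVget vis (i : Int) (j : Int) then dmin St (i : Int) (j : Int) else 0) +
      (if i = x.toNat ∧ j = y.toNat then dmin St x y else 0) := by
    intro i hi j hj
    by_cases hij : (i : Int) = x ∧ (j : Int) = y
    · obtain ⟨h1, h2⟩ := hij
      rw [h1, h2, vget_vset_self n m vis x y h ⟨hx0, hxn, hy0, hym⟩, hv]
      have : i = x.toNat ∧ j = y.toNat := by omega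
      rw [if_pos this]; simp
    · rw [vget_vset_ne vis x y (i : Int) (j : Int) hx0 hy0 (by positivity) (by positivity) hij]
      have : ¬(i = x.toNat ∧ j = y.toNat) := by omega
      rw [if_neg this]; ring
  calc ∑ i ∈ Finset.range n, ∑ j ∈ Finset.range m,
        (if pvVget (pvVset vis x y) (i : Int) (j : Int) then dmin St (i : Int) (j : Int) else 0)
      = ∑ i ∈ Finset.range n, ∑ j ∈ Finset.range m,
        ((if pvVget vis (i : Int) (j : Int) then dmin St (i : Int) (j : Int) else 0) +
         (if i = x.toNat ∧ j = y.toNat then dmin St x y else 0)) := by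
        refine Finset.sum_congr rfl fun i hi => Finset.sum_congr rfl fun j hj => key i hi j hj
    _ = (∑ i ∈ Finset.range n, ∑ j ∈ Finset.range m,
          (if pvVget vis (i : Int) (j : Int) then dmin St (i : Int) (j : Int) else 0)) +
        ∑ i ∈ Finset.range n, ∑ j ∈ Finset.range m,
          (if i = x.toNat ∧ j = y.toNat then dmin St x y else 0) := by
        rw [← Finset.sum_add_distrib]
        refine Finset.sum_congr rfl fun i hi => by rw [← Finset.sum_add_distrib]
    _ = (∑ i ∈ Finset.range n, ∑ j ∈ Finset.range m,
          (if pvVget vis (i : Int) (j : Int) then dmin St (i : Int) (j : Int) else 0)) + dmin St x y := by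
        congr 1
        have hxm : x.toNat ∈ Finset.range n := by simp; omega
        have hym' : y.toNat ∈ Finset.range m := by simp; omega
        rw [Finset.sum_eq_single x.toNat]
        · rw [Finset.sum_eq_single y.toNat]
          · simp
          · intro j hj hne; simp [hne]
          · intro hcon; exact absurd hym' hcon
        · intro i hi hne
          apply Finset.sum_eq_zero; intro j hj; simp [hne]
        · intro hcon; exact absurd hxm hcon

theorem unvn_flip (n m : ℕ) (vis : List (List Bool)) (x y : Int)
    (h : Shp n m vis) (hx : okc n m x y) (hv : pvVget vis x y = false) :
    UnvN n m (pvVset vis x y) + 1 = UnvN n m vis := by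
  obtain ⟨hx0, hxn, hy0, hym⟩ := hx
  have key : ∀ i ∈ Finset.range n, ∀ j ∈ Finset.range m,
      (if pvVget vis (i : Int) (j : Int) then 0 else 1) =
      (if pvVget (pvVset vis x y) (i : Int) (j : Int) then 0 else 1) +
      (if i = x.toNat ∧ j = y.toNat then 1 else 0) := by
    intro i hi j hj
    by_cases hij : (i : Int) = x ∧ (j : Int) = y
    · obtain ⟨h1, h2⟩ := hij
      rw [h1, h2, vget_vset_self n m vis x y h ⟨hx0, hxn, hy0, hym⟩, hv]
      have : i = x.toNat ∧ j = y.toNat := by omega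
      rw [if_pos this]; simp
    · rw [vget_vset_ne vis x y (i : Int) (j : Int) hx0 hy0 (by positivity) (by positivity) hij]
      have : ¬(i = x.toNat ∧ j = y.toNat) := by omega
      rw [if_neg this]; ring
  have : UnvN n m vis = UnvN n m (pvVset vis x y) +
      ∑ i ∈ Finset.range n, ∑ j ∈ Finset.range m, (if i = x.toNat ∧ j = y.toNat then 1 else 0) := by
    unfold UnvN
    rw [← Finset.sum_add_distrib]
    refine Finset.sum_congr rfl fun i hi => ?_
    rw [← Finset.sum_add_distrib]
    exact Finset.sum_congr rfl fun j hj => key i hi j hj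
  rw [this]
  congr 1
  have hxm : x.toNat ∈ Finset.range n := by simp; omega
  have hym' : y.toNat ∈ Finset.range m := by simp; omega
  rw [Finset.sum_eq_single x.toNat]
  · rw [Finset.sum_eq_single y.toNat]
    · simp
    · intro j hj hne; simp [hne]
    · intro hcon; exact absurd hym' hcon
  · intro i hi hne
    apply Finset.sum_eq_zero; intro j hj; simp [hne]
  · intro hcon; exact absurd hxm hcon

theorem sumv_total (n m : ℕ) (St : List (Int × Int)) (vis : List (List Bool))
    (h : ∀ x y, okc n m x y → pvVget vis x y = true) : SumV n m St vis = TotD n m St := by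
  refine Finset.sum_congr rfl fun i hi => Finset.sum_congr rfl fun j hj => ?_
  simp at hi hj
  rw [h (i : Int) (j : Int) ⟨by positivity, by exact_mod_cast hi, by positivity, by exact_mod_cast hj⟩]
  simp

theorem sumv_zero (n m : ℕ) (St : List (Int × Int)) (vis : List (List Bool))
    (h : ∀ x y, okc n m x y → pvVget vis x y = true → dmin St x y = 0) :
    SumV n m St vis = 0 := by
  apply Finset.sum_eq_zero; intro i hi
  apply Finset.sum_eq_zero; intro j hj
  simp at hi hj
  by_cases hv : pvVget vis (i : Int) (j : Int) = true
  · rw [if_pos hv, h (i : Int) (j : Int) ⟨by positivity, by exact_mod_cast hi, by positivity, by exact_mod_cast hj⟩ hv]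
  · simp [hv]

theorem unvn_le (n m : ℕ) (vis : List (List Bool)) : UnvN n m vis ≤ n * m := by
  unfold UnvN
  calc ∑ i ∈ Finset.range n, ∑ j ∈ Finset.range m, (if pvVget vis (i:Int) (j:Int) then 0 else 1)
      ≤ ∑ _i ∈ Finset.range n, ∑ _j ∈ Finset.range m, 1 := by
        refine Finset.sum_le_sum fun i _ => Finset.sum_le_sum fun j _ => ?_
        split <;> omega
    _ = n * m := by simp

-- ---- more matrix lemmas ----
theorem row_set_mono (l : List Bool) (i j : ℕ) (h : l.getD j false = true) :
    (l.set i true).getD j false = true := by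
  by_cases hij : i = j
  · subst hij
    have hl : i < l.length := by
      by_contra hcon
      rw [List.getD_eq_getElem?_getD, List.getElem?_eq_none_iff.2 (by omega)] at h
      exact Bool.false_ne_true h
    rw [List.getD_eq_getElem?_getD, List.getElem?_set_self hl]; rfl
  · rw [List.getD_eq_getElem?_getD, List.getElem?_set_ne hij, ← List.getD_eq_getElem?_getD]
    exact h

theorem vget_vset_mono (vis : List (List Bool)) (x y a b : Int)
    (h : pvVget vis a b = true) : pvVget (pvVset vis x y) a b = true := by
  unfold pvVget at h
  unfold pvVget pvVset
  by_cases hax : x.toNat = a.toNat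
  · rcases lt_or_ge x.toNat vis.length with hl | hl
    · have hga : (vis.set x.toNat ((vis.getD x.toNat []).set y.toNat true)).getD a.toNat [] =
          (vis.getD x.toNat []).set y.toNat true := by
        rw [List.getD_eq_getElem?_getD, ← hax, List.getElem?_set_self hl]; rfl
      rw [hga]
      exact row_set_mono (vis.getD x.toNat []) y.toNat b.toNat (by rw [hax]; exact h)
    · rw [List.set_eq_of_length_le (by omega)]
      exact h
  · have : (vis.set x.toNat ((vis.getD x.toNat []).set y.toNat true)).getD a.toNat [] =
        vis.getD a.toNat [] := by
      rw [List.getD_eq_getElem?_getD, List.getElem?_set_ne hax, ← List.getD_eq_getElem?_getD]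
    rw [this]
    exact h

theorem vget_vset_origin (n m : ℕ) (vis : List (List Bool)) (x y a b : Int)
    (hx : 0 ≤ x) (hy : 0 ≤ y) (hab : okc n m a b)
    (h : pvVget (pvVset vis x y) a b = true) :
    pvVget vis a b = true ∨ (a = x ∧ b = y) := by
  by_cases hc : a = x ∧ b = y
  · exact Or.inr hc
  · obtain ⟨ha, _, hb, _⟩ := hab
    rw [vget_vset_ne vis x y a b hx hy ha hb hc] at h
    exact Or.inl h

theorem dirs_nbr (x y : Int) (dir : Int × Int) (h : dir ∈ pvDirs) :
    nbr x y (x + dir.1) (y + dir.2) := by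
  simp [pvDirs] at h
  rcases h with rfl | rfl | rfl | rfl <;> simp [nbr] <;> omega

theorem nbr_dirs (x y a b : Int) (h : nbr x y a b) :
    ∃ dir ∈ pvDirs, a = x + dir.1 ∧ b = y + dir.2 := by
  unfold nbr at h
  rcases h with ⟨h1 | h1, h2⟩ | ⟨h1, h2 | h2⟩
  · exact ⟨(1, 0), by simp [pvDirs], by omega, by omega⟩
  · exact ⟨(-1, 0), by simp [pvDirs], by omega, by omega⟩
  · exact ⟨(0, 1), by simp [pvDirs], by omega, by omega⟩
  · exact ⟨(0, -1), by simp [pvDirs], by omega, by omega⟩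

-- ---- the inner `for dx, dy in directions` fold ----
theorem relax_fold (n m : ℕ) (St : List (Int × Int)) (hSt : St ≠ []) (x y d0 : Int)
    (hd0 : dmin St x y = d0) :
    ∀ (ds : List (Int × Int)) (q : List (Int × Int × Int)) (vis : List (List Bool)) (t : Int),
    (∀ d ∈ ds, d ∈ pvDirs) →
    Shp n m vis →
    pvVget vis x y = true →
    Cov n m St d0 vis →
    t = SumV n m St vis →
    ∃ app,
      (ds.foldl (pvRelax n m x y d0) (q, vis, t)).1 = q ++ app ∧
      Shp n m (ds.foldl (pvRelax n m x y d0) (q, vis, t)).2.1 ∧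
      (∀ a b : Int, pvVget vis a b = true → pvVget (ds.foldl (pvRelax n m x y d0) (q, vis, t)).2.1 a b = true) ∧
      (∀ a b : Int, okc n m a b → pvVget (ds.foldl (pvRelax n m x y d0) (q, vis, t)).2.1 a b = true →
         pvVget vis a b = true ∨ ∃ e ∈ app, e.1 = a ∧ e.2.1 = b) ∧
      (∀ e ∈ app, okc n m e.1 e.2.1 ∧ e.2.2 = d0 + 1 ∧ dmin St e.1 e.2.1 = d0 + 1 ∧
         pvVget (ds.foldl (pvRelax n m x y d0) (q, vis, t)).2.1 e.1 e.2.1 = true) ∧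
      (∀ a b : Int, okc n m a b → (∃ dir ∈ ds, a = x + dir.1 ∧ b = y + dir.2) →
         pvVget (ds.foldl (pvRelax n m x y d0) (q, vis, t)).2.1 a b = true) ∧
      (ds.foldl (pvRelax n m x y d0) (q, vis, t)).2.2 = SumV n m St (ds.foldl (pvRelax n m x y d0) (q, vis, t)).2.1 ∧
      UnvN n m (ds.foldl (pvRelax n m x y d0) (q, vis, t)).2.1 + app.length = UnvN n m vis := by
  intro ds
  induction ds with
  | nil =>
      intro q vis t _ hshp hvxy hcov ht
      refine ⟨[], by simp, by simpa using hshp, ?_, ?_, ?_, ?_, by simpa using ht, by simp⟩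
      · intro a b h; simpa using h
      · intro a b _ h; exact Or.inl (by simpa using h)
      · intro e he; simp at he
      · intro a b _ h; simp at h
  | cons dir ds ih =>
      intro q vis t hds hshp hvxy hcov ht
      have hdir : dir ∈ pvDirs := hds dir (by simp)
      have hnbr : nbr x y (x + dir.1) (y + dir.2) := dirs_nbr x y dir hdir
      simp only [List.foldl_cons]
      by_cases hc : 0 ≤ x + dir.1 ∧ x + dir.1 < (n : Int) ∧ 0 ≤ y + dir.2 ∧ y + dir.2 < (m : Int) ∧
          pvVget vis (x + dir.1) (y + dir.2) = false
      · -- the neighbour is in bounds and unvisited: it is flipped and enqueued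
        obtain ⟨hb1, hb2, hb3, hb4, hb5⟩ := hc
        have hok' : okc n m (x + dir.1) (y + dir.2) := ⟨hb1, hb2, hb3, hb4⟩
        have hdm : dmin St (x + dir.1) (y + dir.2) = d0 + 1 := by
          have hle := dmin_lip St x y (x + dir.1) (y + dir.2) hSt hnbr
          have hge : ¬ dmin St (x + dir.1) (y + dir.2) ≤ d0 := by
            intro hcon
            rw [hcov (x + dir.1) (y + dir.2) hok' hcon] at hb5
            simp at hb5
          omega
        have hstep : pvRelax n m x y d0 (q, vis, t) dir =
            (q ++ [(x + dir.1, y + dir.2, d0 + 1)], pvVset vis (x + dir.1) (y + dir.2), t + (d0 + 1)) := by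
          unfold pvRelax
          rw [if_pos ⟨hb1, hb2, hb3, hb4, hb5⟩]
        rw [hstep]
        have hshp' : Shp n m (pvVset vis (x + dir.1) (y + dir.2)) :=
          shp_vset n m vis _ _ hshp hok'
        have hvxy' : pvVget (pvVset vis (x + dir.1) (y + dir.2)) x y = true :=
          vget_vset_mono vis _ _ x y hvxy
        have hcov' : Cov n m St d0 (pvVset vis (x + dir.1) (y + dir.2)) := by
          intro a b hab hd
          exact vget_vset_mono vis _ _ a b (hcov a b hab hd)
        have ht' : t + (d0 + 1) = SumV n m St (pvVset vis (x + dir.1) (y + dir.2)) := by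
          rw [sumv_flip n m St vis _ _ hshp hok' hb5, hdm, ht]
        obtain ⟨app', e1, e2, e3, e4, e5, e6, e7, e8⟩ :=
          ih (q ++ [(x + dir.1, y + dir.2, d0 + 1)]) (pvVset vis (x + dir.1) (y + dir.2))
             (t + (d0 + 1)) (fun d hd => hds d (by simp [hd])) hshp' hvxy' hcov' ht'
        refine ⟨(x + dir.1, y + dir.2, d0 + 1) :: app', ?_, e2, ?_, ?_, ?_, ?_, e7, ?_⟩
        · rw [e1, List.append_assoc]; rfl
        · intro a b h
          exact e3 a b (vget_vset_mono vis _ _ a b h)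
        · intro a b hab h
          rcases e4 a b hab h with h1 | h1
          · rcases vget_vset_origin n m vis _ _ a b hb1 hb3 hab h1 with h2 | h2
            · exact Or.inl h2
            · exact Or.inr ⟨(x + dir.1, y + dir.2, d0 + 1), by simp, by simp [h2.1, h2.2]⟩
          · obtain ⟨e, he, hee⟩ := h1
            exact Or.inr ⟨e, by simp [he], hee⟩
        · intro e he
          rcases List.mem_cons.1 he with rfl | he'
          · exact ⟨hok', rfl, hdm, e3 _ _ (vget_vset_self n m _ _ _ hshp hok')⟩
          · exact e5 e he'
        · intro a b hab hex
          obtain ⟨dir', hdir', ha', hb'⟩ := hex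
          rcases List.mem_cons.1 hdir' with rfl | hdir''
          · subst ha'; subst hb'
            exact e3 _ _ (vget_vset_self n m _ _ _ hshp hok')
          · exact e6 a b hab ⟨dir', hdir'', ha', hb'⟩
        · have := unvn_flip n m vis _ _ hshp hok' hb5
          simp only [List.length_cons]
          omega
      · -- neighbour out of bounds or already visited: state unchanged
        have hstep : pvRelax n m x y d0 (q, vis, t) dir = (q, vis, t) := by
          unfold pvRelax
          rw [if_neg hc]
        rw [hstep]
        obtain ⟨app', e1, e2, e3, e4, e5, e6, e7, e8⟩ :=
          ih q vis t (fun d hd => hds d (by simp [hd])) hshp hvxy hcov ht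
        refine ⟨app', e1, e2, e3, e4, e5, ?_, e7, e8⟩
        intro a b hab hex
        obtain ⟨dir', hdir', ha', hb'⟩ := hex
        rcases List.mem_cons.1 hdir' with rfl | hdir''
        · -- this direction was skipped: the target must have been visited already
          subst ha'; subst hb'
          obtain ⟨hb1, hb2, hb3, hb4⟩ := hab
          have hvv : pvVget vis (x + dir'.1) (y + dir'.2) = true := by
            by_contra hcon
            exact hc ⟨hb1, hb2, hb3, hb4, by simpa using hcon⟩
          exact e3 _ _ hvv
        · exact e6 a b hab ⟨dir', hdir'', ha', hb'⟩

-- ---- main BFS loop invariant ----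
theorem nbr_symm (x y a b : Int) (h : nbr x y a b) : nbr a b x y := by
  unfold nbr at h ⊢
  rcases h with ⟨h1 | h1, h2⟩ | ⟨h1, h2 | h2⟩ <;> subst h1 <;> subst h2 <;> simp

theorem bfs_correct (n m : ℕ) (St : List (Int × Int)) (hSt : St ≠ [])
    (hok : ∀ s ∈ St, okc n m s.1 s.2) :
    ∀ (fuel : ℕ) (q : List (Int × Int × Int)) (vis : List (List Bool)) (t : Int),
    BInv n m St q vis → t = SumV n m St vis →
    q.length + 2 * UnvN n m vis ≤ fuel →
    pvBfs n m fuel q vis t = TotD n m St := by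
  intro fuel
  induction fuel with
  | zero =>
      intro q vis t hinv ht hfuel
      have hq : q = [] := by
        cases q with
        | nil => rfl
        | cons e q' => simp at hfuel
      subst hq
      obtain ⟨hshp, hqi, hband, hp, he⟩ := hinv
      rw [show pvBfs n m 0 [] vis t = t from rfl, ht]
      exact sumv_total n m St vis (he rfl)
  | succ fuel ih =>
      intro q vis t hinv ht hfuel
      obtain ⟨hshp, hqi, hband, hp, he⟩ := hinv
      cases q with
      | nil =>
          rw [show pvBfs n m (fuel + 1) [] vis t = t from rfl, ht]
          exact sumv_total n m St vis (he rfl)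
      | cons hd rest =>
          obtain ⟨x, y, d⟩ := hd
          obtain ⟨hxy, hvxy, hd⟩ := hqi (x, y, d) (by simp)
          simp only at hxy hvxy hd
          -- the band decomposition: the popped entry heads the d0-block
          rcases hband with hq0 | ⟨d0, q1, q2, hsplit, hq1ne, hd1, hd2, hcov⟩
          · exact absurd hq0 (by simp)
          obtain ⟨e0, q1t, rfl⟩ : ∃ e0 q1t, q1 = e0 :: q1t := by
            cases q1 with
            | nil => exact absurd rfl hq1ne
            | cons a b => exact ⟨a, b, rfl⟩
          rw [List.cons_append] at hsplit
          injection hsplit with hh1 hh2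
          subst hh1
          have hrest : rest = q1t ++ q2 := hh2
          have hdd0 : d = d0 := hd1 (x, y, d) (by simp)
          have hd0min : dmin St x y = d0 := by rw [← hdd0, ← hd]
          have hd0nn : 0 ≤ d0 := by rw [← hd0min]; exact dmin_nonneg St x y
          -- run the four-direction fold
          obtain ⟨app, e1, e2, e3, e4, e5, e6, e7, e8⟩ :=
            relax_fold n m St hSt x y d0 hd0min pvDirs rest vis t (fun _ h => h)
              hshp hvxy hcov ht
          rw [show pvBfs n m (fuel + 1) ((x, y, d) :: rest) vis t =
                pvBfs n m fuel (pvDirs.foldl (pvRelax n m x y d) (rest, vis, t)).1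
                  (pvDirs.foldl (pvRelax n m x y d) (rest, vis, t)).2.1
                  (pvDirs.foldl (pvRelax n m x y d) (rest, vis, t)).2.2 from rfl]
          rw [hdd0]
          set F := pvDirs.foldl (pvRelax n m x y d0) (rest, vis, t) with hF
          -- new queue-entry invariant
          have hqi' : QInv n m St F.1 F.2.1 := by
            intro e heF
            rw [e1] at heF
            rcases List.mem_append.1 heF with hin | hin
            · obtain ⟨ho, hv, hdm⟩ := hqi e (List.mem_cons_of_mem _ hin)
              exact ⟨ho, e3 _ _ hv, hdm⟩
            · obtain ⟨ho, hdm, hde, hv⟩ := e5 e hin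
              exact ⟨ho, hv, by rw [hdm, hde]⟩
          -- new processed-cell invariant
          have hp' : PInv n m F.1 F.2.1 := by
            intro a b hab hv hnoe a' b' hab' hnbr
            have hvv : pvVget vis a b = true := by
              rcases e4 a b hab hv with h1 | h1
              · exact h1
              · obtain ⟨e, heapp, hc1, hc2⟩ := h1
                exact absurd (hnoe e (by rw [e1]; exact List.mem_append_right _ heapp))
                  (by simp [hc1, hc2])
            by_cases hcx : a = x ∧ b = y
            · obtain ⟨rfl, rfl⟩ := hcx
              exact e6 a' b' hab' (nbr_dirs a b a' b' hnbr)
            · have hnoq : ∀ e ∈ (x, y, d) :: rest, ¬(e.1 = a ∧ e.2.1 = b) := by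
                intro e hee
                rcases List.mem_cons.1 hee with rfl | hee'
                · simpa using fun h1 h2 => hcx ⟨h1.symm, h2.symm⟩
                · exact hnoe e (by rw [e1]; exact List.mem_append_left _ hee')
              exact e3 _ _ (hp a b hab hvv hnoq a' b' hab' hnbr)
          -- cells with an entry of distance d0 other than (x,y) do not exist in rest when q1t = []
          -- new band + end invariants
          have hsize : F.1.length + 2 * UnvN n m F.2.1 ≤ fuel := by
            have hlen : F.1.length = rest.length + app.length := by rw [e1]; simp
            simp only [List.length_cons] at hfuel
            omega
          -- establish Cov at level d0+1 when no d0-entries remain, and EInv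
          have hcovup : q1t = [] → ∀ a b, okc n m a b → dmin St a b ≤ d0 + 1 →
              pvVget F.2.1 a b = true := by
            intro hq1t a b hab hdab
            by_cases hle : dmin St a b ≤ d0
            · exact e3 _ _ (hcov a b hab hle)
            · have hlt : d0 < dmin St a b := by omega
              have hdeq : dmin St a b = d0 + 1 := by omega
              have h1 : 1 ≤ dmin St a b := by omega
              obtain ⟨a', b', hab', hnbr', hdm'⟩ := dmin_desc n m St a b hSt hok hab h1
              have hd0' : dmin St a' b' = d0 := by omega
              have hv' : pvVget vis a' b' = true := hcov a' b' hab' (le_of_eq hd0')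
              by_cases hcx : a' = x ∧ b' = y
              · obtain ⟨rfl, rfl⟩ := hcx
                exact e6 a b hab (nbr_dirs a' b' a b (nbr_symm a b a' b' hnbr'))
              · have hnoq : ∀ e ∈ (x, y, d) :: rest, ¬(e.1 = a' ∧ e.2.1 = b') := by
                  intro e hee
                  rcases List.mem_cons.1 hee with rfl | hee'
                  · simpa using fun h1 h2 => hcx ⟨h1.symm, h2.symm⟩
                  · intro hcc
                    obtain ⟨_, _, hde⟩ := hqi e (by simp [hee'])
                    have hdeq2 : e.2.2 = d0 + 1 := by
                      rw [hrest] at hee'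
                      rcases List.mem_append.1 hee' with hin | hin
                      · rw [hq1t] at hin; simp at hin
                      · exact hd2 e hin
                    rw [hcc.1, hcc.2] at hde
                    omega
                exact e3 _ _ (hp a' b' hab' hv' hnoq a b hab (nbr_symm a b a' b' hnbr'))
          have he' : EInv n m F.1 F.2.1 := by
            intro hFnil
            have happnil : app = [] ∧ rest = [] := by
              rw [hFnil] at e1
              constructor
              · cases app with
                | nil => rfl
                | cons u v => rw [eq_comm] at e1; simp at e1
              · cases rest with
                | nil => rfl
                | cons u v => rw [eq_comm] at e1; simp at e1
            have hq1t : q1t = [] := by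
              have := hrest
              rw [happnil.2] at this
              cases q1t with
              | nil => rfl
              | cons u v => simp at this
            -- every cell is visited: strong induction on the distance above d0
            have hup : ∀ k : ℕ, ∀ a b, okc n m a b → dmin St a b ≤ d0 + k →
                pvVget F.2.1 a b = true := by
              intro k
              induction k with
              | zero => intro a b hab hd; exact e3 _ _ (hcov a b hab (by omega))
              | succ k ihk =>
                  intro a b hab hd
                  by_cases hle : dmin St a b ≤ d0 + k
                  · exact ihk a b hab hle
                  · have hlt : d0 + k < dmin St a b := by omega
                    have hdeq : dmin St a b = d0 + k + 1 := by omega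
                    have h1 : 1 ≤ dmin St a b := by omega
                    obtain ⟨a', b', hab', hnbr', hdm'⟩ := dmin_desc n m St a b hSt hok hab h1
                    have hv' : pvVget F.2.1 a' b' = true := ihk a' b' hab' (by omega)
                    have hnoe : ∀ e ∈ F.1, ¬(e.1 = a' ∧ e.2.1 = b') := by
                      rw [hFnil]; intro e hee; simp at hee
                    exact hp' a' b' hab' hv' hnoe a b hab (nbr_symm a b a' b' hnbr')
            intro a b hab
            have : dmin St a b ≤ d0 + (dmin St a b - d0).toNat := by
              have := dmin_nonneg St a b; omega
            exact hup (dmin St a b - d0).toNat a b hab this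
          have hband' : Band n m St F.1 F.2.1 := by
            cases hq1tc : q1t with
            | cons u q1tt =>
                -- entries of distance d0 remain at the front
                refine Or.inr ⟨d0, u :: q1tt, q2 ++ app, ?_, by simp, ?_, ?_, ?_⟩
                · rw [e1, hrest, hq1tc]; simp
                · intro e hee; exact hd1 e (by rw [hq1tc]; simp at hee ⊢; tauto)
                · intro e hee
                  rcases List.mem_append.1 hee with hin | hin
                  · exact hd2 e hin
                  · exact (e5 e hin).2.1
                · intro a b hab hdab
                  exact e3 _ _ (hcov a b hab hdab)
            | nil =>
                cases hq2app : q2 ++ app with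
                | nil =>
                    refine Or.inl ?_
                    rw [e1, hrest, hq1tc]
                    simpa using hq2app
                | cons u rest2 =>
                    refine Or.inr ⟨d0 + 1, u :: rest2, [], ?_, by simp, ?_, by simp, ?_⟩
                    · rw [e1, hrest, hq1tc, ← hq2app]; simp
                    · intro e hee
                      rw [← hq2app] at hee
                      rcases List.mem_append.1 hee with hin | hin
                      · exact hd2 e hin
                      · exact (e5 e hin).2.1
                    · exact hcovup hq1tc
          exact ih F.1 F.2.1 F.2.2 ⟨e2, hqi', hband', hp', he'⟩ e7 hsize

-- ---- initialization and station list ----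
def vIdx (grid : List (List Int)) (i j : ℕ) : Int := (grid.getD i []).getD j 0

def allCells (n m : ℕ) : List (ℕ × ℕ) :=
  (List.range n).flatMap (fun i => (List.range m).map (fun j => (i, j)))

def StB (grid : List (List Int)) : List (Int × Int) :=
  (List.range grid.length).flatMap (fun (i : ℕ) =>
    ((List.range (grid.headI).length).filter (fun j => vIdx grid i j = 1)).map
      (fun (j : ℕ) => ((i : Int), (j : Int))))

theorem StB_eq (grid : List (List Int)) :
    StB grid = ((allCells grid.length (grid.headI).length).filter
      (fun p => vIdx grid p.1 p.2 = 1)).map (fun p => ((p.1 : Int), (p.2 : Int))) := by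
  unfold StB allCells
  rw [List.filter_flatMap, List.map_flatMap]
  refine List.flatMap_congr ?_
  intro i _
  rw [List.filter_map, List.map_map]
  rfl

theorem StB_ok (grid : List (List Int)) :
    ∀ s ∈ StB grid, okc grid.length (grid.headI).length s.1 s.2 := by
  intro s hs
  unfold StB at hs
  simp only [List.mem_flatMap, List.mem_map, List.mem_filter, List.mem_range] at hs
  obtain ⟨i, hi, j, ⟨hj, _⟩, rfl⟩ := hs
  exact ⟨by positivity, by simpa using (by exact_mod_cast hi : (i : Int) < grid.length),
    by positivity, by simpa using (by exact_mod_cast hj : (j : Int) < (grid.headI).length)⟩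

theorem mem_allCells (n m : ℕ) (p : ℕ × ℕ) :
    p ∈ allCells n m ↔ p.1 < n ∧ p.2 < m := by
  unfold allCells
  simp only [List.mem_flatMap, List.mem_map, List.mem_range]
  constructor
  · rintro ⟨i, hi, j, hj, rfl⟩; exact ⟨hi, hj⟩
  · rintro ⟨h1, h2⟩; exact ⟨p.1, h1, p.2, h2, rfl⟩

theorem foldl_nested {σ : Type} (f : σ → ℕ × ℕ → σ) :
    ∀ (is : List ℕ) (js : List ℕ) (s : σ),
    is.foldl (fun s i => js.foldl (fun s j => f s (i, j)) s) s =
      (is.flatMap (fun i => js.map (fun j => (i, j)))).foldl f s := by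
  intro is
  induction is with
  | nil => intro js s; simp
  | cons i is ih =>
      intro js s
      simp only [List.foldl_cons, List.flatMap_cons, List.foldl_append, ih, List.foldl_map]

theorem init_fold (grid : List (List Int)) (n m : ℕ) :
    ∀ (L : List (ℕ × ℕ)) (q0 : List (Int × Int × Int)) (vis0 : List (List Bool)),
    Shp n m vis0 →
    (∀ p ∈ L, p.1 < n ∧ p.2 < m) →
    (L.foldl (fun st p => if vIdx grid p.1 p.2 = 1 then
        (st.1 ++ [((p.1 : Int), (p.2 : Int), (0 : Int))], pvVset st.2 (p.1 : Int) (p.2 : Int))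
      else st) (q0, vis0)).1 =
      q0 ++ (L.filter (fun p => vIdx grid p.1 p.2 = 1)).map (fun p => ((p.1 : Int), (p.2 : Int), (0 : Int))) ∧
    Shp n m (L.foldl (fun st p => if vIdx grid p.1 p.2 = 1 then
        (st.1 ++ [((p.1 : Int), (p.2 : Int), (0 : Int))], pvVset st.2 (p.1 : Int) (p.2 : Int))
      else st) (q0, vis0)).2 ∧
    (∀ a b : Int, okc n m a b →
      (pvVget (L.foldl (fun st p => if vIdx grid p.1 p.2 = 1 then
          (st.1 ++ [((p.1 : Int), (p.2 : Int), (0 : Int))], pvVset st.2 (p.1 : Int) (p.2 : Int))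
        else st) (q0, vis0)).2 a b = true ↔
        (pvVget vis0 a b = true ∨ ∃ p ∈ L, vIdx grid p.1 p.2 = 1 ∧ a = (p.1 : Int) ∧ b = (p.2 : Int)))) := by
  intro L
  induction L with
  | nil =>
      intro q0 vis0 hshp _
      refine ⟨by simp, by simpa using hshp, ?_⟩
      intro a b _
      simp
  | cons p L ih =>
      intro q0 vis0 hshp hb
      have hpok : okc n m (p.1 : Int) (p.2 : Int) := by
        obtain ⟨h1, h2⟩ := hb p (by simp)
        exact ⟨by positivity, by exact_mod_cast h1, by positivity, by exact_mod_cast h2⟩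
      by_cases hv : vIdx grid p.1 p.2 = 1
      · have hstep : ((p :: L).foldl (fun st p => if vIdx grid p.1 p.2 = 1 then
            (st.1 ++ [((p.1 : Int), (p.2 : Int), (0 : Int))], pvVset st.2 (p.1 : Int) (p.2 : Int))
          else st) (q0, vis0)) = (L.foldl (fun st p => if vIdx grid p.1 p.2 = 1 then
            (st.1 ++ [((p.1 : Int), (p.2 : Int), (0 : Int))], pvVset st.2 (p.1 : Int) (p.2 : Int))
          else st) (q0 ++ [((p.1 : Int), (p.2 : Int), (0 : Int))], pvVset vis0 (p.1 : Int) (p.2 : Int))) := by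
          simp only [List.foldl_cons, if_pos hv]
        rw [hstep]
        have hshp' : Shp n m (pvVset vis0 (p.1 : Int) (p.2 : Int)) :=
          shp_vset n m vis0 _ _ hshp hpok
        obtain ⟨ih1, ih2, ih3⟩ := ih (q0 ++ [((p.1 : Int), (p.2 : Int), (0 : Int))])
          (pvVset vis0 (p.1 : Int) (p.2 : Int)) hshp' (fun p hp => hb p (by simp [hp]))
        refine ⟨by rw [ih1, List.filter_cons_of_pos (by simpa using hv), List.map_cons, List.append_assoc]; rfl,
          ih2, ?_⟩
        intro a b hab
        rw [ih3 a b hab]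
        constructor
        · rintro (h1 | h1)
          · rcases vget_vset_origin n m vis0 _ _ a b hpok.1 hpok.2.2.1 hab h1 with h2 | h2
            · exact Or.inl h2
            · exact Or.inr ⟨p, by simp, hv, h2.1, h2.2⟩
          · obtain ⟨p', hp', hc⟩ := h1
            exact Or.inr ⟨p', by simp [hp'], hc⟩
        · rintro (h1 | h1)
          · exact Or.inl (vget_vset_mono vis0 _ _ a b h1)
          · obtain ⟨p', hp', hv', ha', hb'⟩ := h1
            rcases List.mem_cons.1 hp' with rfl | hp''
            · subst ha'; subst hb'
              exact Or.inl (vget_vset_self n m vis0 _ _ hshp hpok)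
            · exact Or.inr ⟨p', hp'', hv', ha', hb'⟩
      · have hstep : ((p :: L).foldl (fun st p => if vIdx grid p.1 p.2 = 1 then
            (st.1 ++ [((p.1 : Int), (p.2 : Int), (0 : Int))], pvVset st.2 (p.1 : Int) (p.2 : Int))
          else st) (q0, vis0)) = (L.foldl (fun st p => if vIdx grid p.1 p.2 = 1 then
            (st.1 ++ [((p.1 : Int), (p.2 : Int), (0 : Int))], pvVset st.2 (p.1 : Int) (p.2 : Int))
          else st) (q0, vis0)) := by
          simp only [List.foldl_cons, if_neg hv]
        rw [hstep]
        obtain ⟨ih1, ih2, ih3⟩ := ih q0 vis0 hshp (fun p hp => hb p (by simp [hp]))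
        refine ⟨by rw [ih1, List.filter_cons_of_neg (by simpa using hv)], ih2, ?_⟩
        intro a b hab
        rw [ih3 a b hab]
        constructor
        · rintro (h1 | h1)
          · exact Or.inl h1
          · obtain ⟨p', hp', hc⟩ := h1
            exact Or.inr ⟨p', by simp [hp'], hc⟩
        · rintro (h1 | h1)
          · exact Or.inl h1
          · obtain ⟨p', hp', hv', ha', hb'⟩ := h1
            rcases List.mem_cons.1 hp' with rfl | hp''
            · exact absurd hv' hv
            · exact Or.inr ⟨p', hp'', hv', ha', hb'⟩

-- ---- list-sum bridges ----
theorem foldl_add_inner (g : ℕ → Int) :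
    ∀ (l : List ℕ) (acc : Int), l.foldl (fun a j => a + g j) acc = acc + (l.map g).sum := by
  intro l
  induction l with
  | nil => intro acc; simp
  | cons j l ih => intro acc; simp [ih]; ring

theorem map_range_sum (g : ℕ → Int) : ∀ k : ℕ, ((List.range k).map g).sum = ∑ j ∈ Finset.range k, g j := by
  intro k
  induction k with
  | zero => simp
  | succ k ih => rw [List.range_succ, Finset.sum_range_succ, List.map_append, List.sum_append, ih]; simp

theorem foldl_double_sum (m : ℕ) (g : ℕ → ℕ → Int) :
    ∀ (l : List ℕ) (acc : Int),
    l.foldl (fun a i => (List.range m).foldl (fun a j => a + g i j) a) acc =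
      acc + (l.map (fun i => ∑ j ∈ Finset.range m, g i j)).sum := by
  intro l
  induction l with
  | nil => intro acc; simp
  | cons i l ih =>
      intro acc
      simp only [List.foldl_cons, List.map_cons, List.sum_cons]
      rw [foldl_add_inner (g i) (List.range m) acc, map_range_sum (g i) m, ih]
      ring

theorem StB_len (grid : List (List Int)) :
    (StB grid).length ≤ grid.length * (grid.headI).length := by
  rw [StB_eq, List.length_map]
  calc ((allCells grid.length (grid.headI).length).filter _).length
      ≤ (allCells grid.length (grid.headI).length).length := List.length_filter_le _ _
    _ = grid.length * (grid.headI).length := by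
        unfold allCells
        rw [List.length_flatMap]
        simp

theorem pvBfs_nil (n m fuel : ℕ) (vis : List (List Bool)) (t : Int) :
    pvBfs n m fuel [] vis t = t := by
  cases fuel <;> rfl

-- ---- evaluation of the two ports ----
theorem B_eval (grid : List (List Int)) :
    goodlandElectricity_alt grid =
      (if StB grid = [] then 0
       else TotD grid.length (grid.headI).length (StB grid)) := by
  show (if StB grid = [] then (0 : Int)
        else (List.range grid.length).foldl (fun (acc : Int) (i : ℕ) =>
          (List.range (grid.headI).length).foldl (fun (acc : Int) (j : ℕ) =>
            acc + (((StB grid).map (fun s => |(i : Int) - s.1| + |(j : Int) - s.2|)).min?).getD 0) acc) 0) = _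
  by_cases h : StB grid = []
  · rw [if_pos h, if_pos h]
  · rw [if_neg h, if_neg h]
    show (List.range grid.length).foldl (fun (acc : Int) (i : ℕ) =>
      (List.range (grid.headI).length).foldl (fun (acc : Int) (j : ℕ) =>
        acc + dmin (StB grid) (i : Int) (j : Int)) acc) 0 = _
    rw [foldl_double_sum (grid.headI).length
      (fun i j => dmin (StB grid) (i : Int) (j : Int)) (List.range grid.length) 0,
      map_range_sum _ grid.length]
    simp [TotD]

theorem A_eval (grid : List (List Int)) :
    goodlandElectricity grid =
      (if StB grid = [] then 0
       else TotD grid.length (grid.headI).length (StB grid)) := by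
  have hnest := foldl_nested
    (f := fun (st : List (Int × Int × Int) × List (List Bool)) (p : ℕ × ℕ) =>
      if vIdx grid p.1 p.2 = 1 then
        (st.1 ++ [((p.1 : Int), (p.2 : Int), (0 : Int))], pvVset st.2 (p.1 : Int) (p.2 : Int))
      else st)
    (List.range grid.length) (List.range (grid.headI).length)
    (([] : List (Int × Int × Int)), List.replicate grid.length (List.replicate (grid.headI).length false))
  have hinit := init_fold grid grid.length (grid.headI).length
    (allCells grid.length (grid.headI).length)
    ([] : List (Int × Int × Int))
    (List.replicate grid.length (List.replicate (grid.headI).length false))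
    (shp_replicate _ _)
    (fun p hp => (mem_allCells _ _ p).1 hp)
  obtain ⟨i1, i2, i3⟩ := hinit
  -- rewrite the port's nested fold into the flat fold over allCells
  have hA : goodlandElectricity grid =
      pvBfs grid.length (grid.headI).length (3 * grid.length * (grid.headI).length + 1)
        ((allCells grid.length (grid.headI).length).foldl (fun st p =>
          if vIdx grid p.1 p.2 = 1 then
            (st.1 ++ [((p.1 : Int), (p.2 : Int), (0 : Int))], pvVset st.2 (p.1 : Int) (p.2 : Int))
          else st)
          (([] : List (Int × Int × Int)),
            List.replicate grid.length (List.replicate (grid.headI).length false))).1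
        ((allCells grid.length (grid.headI).length).foldl (fun st p =>
          if vIdx grid p.1 p.2 = 1 then
            (st.1 ++ [((p.1 : Int), (p.2 : Int), (0 : Int))], pvVset st.2 (p.1 : Int) (p.2 : Int))
          else st)
          (([] : List (Int × Int × Int)),
            List.replicate grid.length (List.replicate (grid.headI).length false))).2 0 :=
    congrArg (fun st : List (Int × Int × Int) × List (List Bool) =>
      pvBfs grid.length (grid.headI).length (3 * grid.length * (grid.headI).length + 1)
        st.1 st.2 0) hnest
  rw [hA]
  set n := grid.length
  set m := (grid.headI).length
  set F := (allCells n m).foldl (fun st p =>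
      if vIdx grid p.1 p.2 = 1 then
        (st.1 ++ [((p.1 : Int), (p.2 : Int), (0 : Int))], pvVset st.2 (p.1 : Int) (p.2 : Int))
      else st)
      (([] : List (Int × Int × Int)), List.replicate n (List.replicate m false)) with hFdef
  have hq : F.1 = (StB grid).map (fun s => (s.1, s.2, (0 : Int))) := by
    rw [i1, StB_eq, List.map_map]
    rfl
  have hvis : ∀ a b : Int, okc n m a b → (pvVget F.2 a b = true ↔ (a, b) ∈ StB grid) := by
    intro a b hab
    rw [i3 a b hab, StB_eq]
    simp only [vget_replicate, Bool.false_eq_true, false_or, List.mem_map, List.mem_filter]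
    constructor
    · rintro ⟨p, hp, hv, rfl, rfl⟩
      exact ⟨p, ⟨hp, by simpa using hv⟩, rfl⟩
    · rintro ⟨p, ⟨hp, hv⟩, hpe⟩
      refine ⟨p, hp, by simpa using hv, ?_, ?_⟩
      · exact (congrArg Prod.fst hpe).symm
      · exact (congrArg Prod.snd hpe).symm
  by_cases hSt : StB grid = []
  · rw [if_pos hSt]
    have : F.1 = [] := by rw [hq, hSt]; rfl
    rw [this, pvBfs_nil]
  · rw [if_neg hSt]
    -- the BFS invariant holds for the initial state
    have hok := StB_ok grid
    have hstvis : ∀ s ∈ StB grid, pvVget F.2 s.1 s.2 = true := by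
      intro s hs
      exact (hvis s.1 s.2 (hok s hs)).2 (by simpa using hs)
    have hqi : QInv n m (StB grid) F.1 F.2 := by
      intro e he
      rw [hq] at he
      obtain ⟨s, hs, rfl⟩ := List.mem_map.1 he
      exact ⟨hok s hs, hstvis s hs, (dmin_station (StB grid) s.1 s.2 (by simpa using hs)).symm⟩
    have hband : Band n m (StB grid) F.1 F.2 := by
      refine Or.inr ⟨0, F.1, [], by simp, ?_, ?_, by simp, ?_⟩
      · rw [hq]
        intro hcon
        exact hSt (by simpa using List.map_eq_nil_iff.1 hcon)
      · intro e he
        rw [hq] at he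
        obtain ⟨s, hs, rfl⟩ := List.mem_map.1 he
        rfl
      · intro a b hab hd
        have h0 : dmin (StB grid) a b = 0 :=
          le_antisymm hd (dmin_nonneg (StB grid) a b)
        exact (hvis a b hab).2 (dmin_zero_mem (StB grid) a b hSt h0)
    have hp : PInv n m F.1 F.2 := by
      intro a b hab hv hnoe a' b' _ _
      have hmem : (a, b) ∈ StB grid := (hvis a b hab).1 hv
      have : ((a, b, (0 : Int)) : Int × Int × Int) ∈ F.1 := by
        rw [hq]
        exact List.mem_map.2 ⟨(a, b), hmem, rfl⟩
      exact absurd (hnoe _ this) (by simp)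
    have he : EInv n m F.1 F.2 := by
      intro hcon
      rw [hq] at hcon
      exact absurd (List.map_eq_nil_iff.1 hcon) hSt
    have ht : (0 : Int) = SumV n m (StB grid) F.2 := by
      refine (sumv_zero n m (StB grid) F.2 ?_).symm
      intro a b hab hv
      exact dmin_station (StB grid) a b ((hvis a b hab).1 hv)
    have hfuel : F.1.length + 2 * UnvN n m F.2 ≤ 3 * n * m + 1 := by
      have h1 : F.1.length ≤ n * m := by
        rw [hq, List.length_map]
        exact StB_len grid
      have h2 := unvn_le n m F.2
      have h3 : 3 * n * m = 3 * (n * m) := by ring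
      omega
    exact bfs_correct n m (StB grid) hSt hok (3 * n * m + 1) F.1 F.2 0
      ⟨i2, hqi, hband, hp, he⟩ ht hfuel

-- ===== VERDICT (by name: the statement is the Claim_ definition above) =====
theorem goodlandElectricity_spec : Claim_equal_goodlandElectricity := by
  intro grid _ _
  unfold Spec_goodlandElectricity
  rw [A_eval, B_eval]
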